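-- pv_equiv track=rewrite | github.com/Babyboomer64/PythonCore | src/language_catalog.py | _domain_chain
-- ===== SOURCE A (Python) =====
-- from typing import Dict, Any, Optional, Iterable, List
--
-- ROOT_DOMAIN = "GLOBAL"
--
-- def _normalize_domain(domain: Optional[str]) -> str:
--     """Normalize a domain string; None/empty becomes ROOT_DOMAIN."""
--     if not domain:
--         return ROOT_DOMAIN
--     d = domain.strip()
--     return d if d else ROOT_DOMAIN
--
-- def _domain_chain(domain: str) -> List[str]:
--     """
--     Build a search chain from most specific domain to ROOT_DOMAIN.
--     Example: "GLOBAL.DATABASE.ORACLE" -> ["GLOBAL.DATABASE.ORACLE", "GLOBAL.DATABASE", "GLOBAL"]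
--     If domain already equals ROOT_DOMAIN, returns ["GLOBAL"].
--     """
--     domain = _normalize_domain(domain)
--     if domain == ROOT_DOMAIN:
--         return [ROOT_DOMAIN]
--     parts = domain.split(".")
--     out = [".".join(parts[:i]) for i in range(len(parts), 0, -1)]
--     # Ensure ROOT_DOMAIN is included at the end (if not already)
--     if out[-1] != ROOT_DOMAIN:
--         out.append(ROOT_DOMAIN)
--     return out
-- ===== SOURCE B (Python) =====
-- ROOT_DOMAIN = "GLOBAL"
--
-- def _domain_chain(domain):
--     d = domain.strip() if domain else ""
--     if not d:
--         d = ROOT_DOMAIN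
--     if d == ROOT_DOMAIN:
--         return [ROOT_DOMAIN]
--     out = []
--     cur = d
--     while True:
--         out.append(cur)
--         idx = cur.rfind(".")
--         if idx == -1:
--             break
--         cur = cur[:idx]
--     if out[-1] != ROOT_DOMAIN:
--         out.append(ROOT_DOMAIN)
--     return out
-- ===== Notes on version B (the rewrite author's own statement) =====
-- stated objective: alternative
-- what changed: B keeps one running string and repeatedly chops it at the last dot (str.rfind) to emit the chain, instead of splitting into a parts list and re-joining every prefix.
import Mathlib
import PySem

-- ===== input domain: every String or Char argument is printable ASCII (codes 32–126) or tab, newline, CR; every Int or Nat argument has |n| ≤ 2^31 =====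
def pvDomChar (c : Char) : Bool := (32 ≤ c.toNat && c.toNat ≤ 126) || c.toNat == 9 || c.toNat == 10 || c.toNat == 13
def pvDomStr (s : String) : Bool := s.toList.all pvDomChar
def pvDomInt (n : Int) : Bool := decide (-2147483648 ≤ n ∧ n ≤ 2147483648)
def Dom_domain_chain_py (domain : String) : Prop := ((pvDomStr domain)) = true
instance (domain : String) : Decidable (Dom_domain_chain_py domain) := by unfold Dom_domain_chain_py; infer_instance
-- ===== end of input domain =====

-- B rebuilds the chain by repeatedly chopping one running string at its last '.'
-- (rfind) instead of splitting into parts and re-joining every prefix; same values.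

def ROOT_DOMAIN : String := "GLOBAL"

-- ===== PORT A =====
def normalize_domain_py (domain : String) : String :=
  if domain == "" then ROOT_DOMAIN
  else
    let d := PySem.Str.strip domain
    if d == "" then ROOT_DOMAIN else d

def domain_chain_py (domain : String) : List String :=
  let domain := normalize_domain_py domain
  if domain == ROOT_DOMAIN then [ROOT_DOMAIN]
  else
    -- parts = domain.split(".")  (sep ≠ "", so split? is always `some`; getD never fires)
    let parts := (PySem.Str.split? domain ".").getD []
    let out := (PySem.List.pyRange (parts.length : Int) 0 (-1)).map
      (fun i => PySem.Str.join "." (PySem.List.slice parts none (some i)))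
    -- out[-1] != ROOT_DOMAIN (out is never empty, so pyGet? is always `some`)
    if PySem.List.pyGet? out (-1) != some ROOT_DOMAIN then out ++ [ROOT_DOMAIN] else out

-- ===== PORT B =====
-- termination fact for the chop loop: a non-(-1) rfind of "." is a position strictly inside the string
theorem pv_rfind_go_cases (s : List Char) (j : Nat) :
    PySem.Chars.rfind.go s ['.'] j = -1 ∨
      (0 ≤ PySem.Chars.rfind.go s ['.'] j ∧ (PySem.Chars.rfind.go s ['.'] j).toNat < s.length) := by
  induction j with
  | zero =>
    simp only [PySem.Chars.rfind.go]
    split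
    · rename_i h
      right
      have hp : ['.'] <+: s := List.isPrefixOf_iff_prefix.mp h
      have : 0 < s.length := by
        cases s with
        | nil => simp [List.IsPrefix] at hp
        | cons a t => simp
      omega
    · left; rfl
  | succ j ih =>
    simp only [PySem.Chars.rfind.go]
    split
    · rename_i h
      right
      have hp : ['.'] <+: List.drop (j+1) s := List.isPrefixOf_iff_prefix.mp h
      have hne : List.drop (j+1) s ≠ [] := by
        intro hnil; rw [hnil] at hp; simp [List.IsPrefix] at hp
      have : j + 1 < s.length := by
        by_contra hge
        exact hne (List.drop_eq_nil_of_le (by omega))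
      constructor
      · positivity
      · simpa using this
    · exact ih

theorem pv_rfind_dot_cases (s : List Char) :
    PySem.Chars.rfind s ['.'] = -1 ∨
      (0 ≤ PySem.Chars.rfind s ['.'] ∧ (PySem.Chars.rfind s ['.']).toNat < s.length) :=
  pv_rfind_go_cases s s.length

def chain_loop (cur : String) (out : List String) : List String :=
  -- while True: out.append(cur); idx = cur.rfind("."); if idx == -1: break; cur = cur[:idx]
  let out' := out ++ [cur]
  let idx := PySem.Str.rfind cur "."
  if idx = -1 then out'
  else chain_loop (PySem.Str.slice cur none (some idx)) out'
termination_by cur.toList.length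
decreasing_by
  rename_i h
  rcases pv_rfind_dot_cases cur.toList with hc | ⟨h0, hlt⟩
  · exact absurd (by simpa [PySem.Str.rfind_eq] using hc) (by simpa using h)
  · have h0' : (0:Int) ≤ PySem.Str.rfind cur "." := by simpa [PySem.Str.rfind_eq] using h0
    simp only [PySem.Str.toList_slice, PySem.Chars.slice_eq_listSlice]
    rw [PySem.List.slice_to cur.toList h0']
    simp only [List.length_take]
    have hlt' : (PySem.Str.rfind cur ".").toNat < cur.toList.length := by
      simpa [PySem.Str.rfind_eq] using hlt
    omega

def domain_chain_py_alt (domain : String) : List String :=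
  let d0 := if domain == "" then "" else PySem.Str.strip domain
  let d := if d0 == "" then ROOT_DOMAIN else d0
  if d == ROOT_DOMAIN then [ROOT_DOMAIN]
  else
    let out := chain_loop d []
    -- out[-1] != ROOT_DOMAIN (out is never empty, so pyGet? is always `some`)
    if PySem.List.pyGet? out (-1) != some ROOT_DOMAIN then out ++ [ROOT_DOMAIN] else out

-- ===== PRECONDITION & SPEC =====
def Spec_domain_chain_py (domain : String) (out : List String) : Prop := out = domain_chain_py_alt domain
instance (domain : String) (out : List String) : Decidable (Spec_domain_chain_py domain out) := by unfold Spec_domain_chain_py; infer_instance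

-- ===== CLAIM (what is proved, stated in full; the proofs are below) =====
def Claim_equal_domain_chain_py : Prop := ∀ (domain : String), Dom_domain_chain_py domain → Spec_domain_chain_py domain (domain_chain_py domain)

-- ===== LEMMAS AND PROOFS =====

theorem pv_splitOn_go (fuel : Nat) : ∀ (l cur : List Char) (acc : List (List Char)), l.length ≤ fuel →
    PySem.Chars.splitOn.go ['.'] fuel l cur acc
      = acc.reverse ++ List.modifyHead (cur.reverse ++ ·) (List.splitOn '.' l) := by
  induction fuel with
  | zero =>
    intro l cur acc h
    have : l = [] := List.eq_nil_of_length_eq_zero (by omega)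
    subst this
    simp [PySem.Chars.splitOn.go, List.splitOn, List.splitOnP_nil]
  | succ fuel ih =>
    intro l cur acc h
    cases l with
    | nil => simp [PySem.Chars.splitOn.go, List.splitOn, List.splitOnP_nil]
    | cons c rest =>
      simp only [PySem.Chars.splitOn.go]
      by_cases hc : c = '.'
      · subst hc
        rw [if_pos (by simp)]
        rw [ih _ _ _ (by simpa using Nat.le_of_succ_le_succ h)]
        obtain ⟨hd, tl, hsp⟩ : ∃ hd tl, List.splitOn '.' rest = hd :: tl := by
          rcases hx : List.splitOn '.' rest with _ | ⟨hd, tl⟩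
          · exact absurd hx (List.splitOnP_ne_nil _ _)
          · exact ⟨hd, tl, rfl⟩
        simp [List.splitOn, List.splitOnP_cons] at *
        simp [hsp]
      · rw [if_neg (by simp only [List.isPrefixOf_iff_prefix]; simp; exact fun h => hc h.symm)]
        rw [ih _ _ _ (by simpa using Nat.le_of_succ_le_succ h)]
        obtain ⟨hd, tl, hsp⟩ : ∃ hd tl, List.splitOn '.' rest = hd :: tl := by
          rcases hx : List.splitOn '.' rest with _ | ⟨hd, tl⟩
          · exact absurd hx (List.splitOnP_ne_nil _ _)
          · exact ⟨hd, tl, rfl⟩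
        simp only [List.splitOn, List.splitOnP_cons] at *
        rw [if_neg (by simp [hc])]
        simp [hsp]

theorem pv_splitOn_eq (s : List Char) :
    PySem.Chars.splitOn s ['.'] = List.splitOn '.' s := by
  rw [PySem.Chars.splitOn, pv_splitOn_go _ _ _ _ (by omega)]
  obtain ⟨hd, tl, hsp⟩ : ∃ hd tl, List.splitOn '.' s = hd :: tl := by
    rcases hx : List.splitOn '.' s with _ | ⟨hd, tl⟩
    · exact absurd hx (List.splitOnP_ne_nil _ _)
    · exact ⟨hd, tl, rfl⟩
  simp [hsp]

theorem pv_mem_splitOn (s : List Char) : ∀ l ∈ List.splitOn '.' s, '.' ∉ l := by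
  induction s with
  | nil => simp [List.splitOn, List.splitOnP_nil]
  | cons c rest ih =>
    simp only [List.splitOn, List.splitOnP_cons] at *
    by_cases hc : c = '.'
    · subst hc
      rw [if_pos (by decide)]
      intro l hl
      rcases List.mem_cons.mp hl with hl | hl
      · simp [hl]
      · exact ih l hl
    · rw [if_neg (by simp [hc])]
      obtain ⟨hd, tl, hsp⟩ : ∃ hd tl, List.splitOnP (fun x => x == '.') rest = hd :: tl := by
        rcases hx : List.splitOnP (fun x => x == '.') rest with _ | ⟨hd, tl⟩
        · exact absurd hx (List.splitOnP_ne_nil _ _)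
        · exact ⟨hd, tl, rfl⟩
      rw [hsp]
      simp only [List.modifyHead_cons]
      intro l hl
      rcases List.mem_cons.mp hl with hl | hl
      · subst hl
        have hhd := ih hd (by rw [hsp]; exact List.mem_cons_self)
        simp only [List.mem_cons]
        rintro (h | h)
        · exact hc h.symm
        · exact hhd h
      · exact ih l (by rw [hsp]; exact List.mem_cons_of_mem _ hl)

theorem pv_rfind_go_no_dot (s : List Char) (hs : '.' ∉ s) (j : Nat) :
    PySem.Chars.rfind.go s ['.'] j = -1 := by
  have hpre : ∀ k : Nat, ¬ (['.'].isPrefixOf (List.drop k s) = true) := by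
    intro k hk
    have hp : ['.'] <+: List.drop k s := List.isPrefixOf_iff_prefix.mp hk
    exact hs (List.mem_of_mem_drop (hp.mem (by simp)))
  induction j with
  | zero =>
    simp only [PySem.Chars.rfind.go]
    rw [if_neg (by simpa using hpre 0)]
  | succ j ih =>
    simp only [PySem.Chars.rfind.go]
    rw [if_neg (hpre (j+1))]
    exact ih

theorem pv_rfind_no_dot (s : List Char) (hs : '.' ∉ s) :
    PySem.Chars.rfind s ['.'] = -1 :=
  pv_rfind_go_no_dot s hs s.length

theorem pv_rfind_go_last (s t : List Char) (ht : '.' ∉ t) (k : Nat) :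
    PySem.Chars.rfind.go (s ++ '.' :: t) ['.'] (s.length + k) = s.length := by
  induction k with
  | zero =>
    cases s with
    | nil => simp [PySem.Chars.rfind.go]
    | cons a s' =>
      simp only [List.length_cons, Nat.add_zero]
      simp only [PySem.Chars.rfind.go]
      rw [if_pos (show _ = true by
        rw [show s'.length + 1 = (a :: s').length from by simp, List.drop_left]
        simp)]
  | succ k ih =>
    have hdrop : List.drop (s.length + k + 1) (s ++ '.' :: t) = List.drop k t := by
      rw [show s.length + k + 1 = s.length + (k + 1) from by omega, List.drop_append]
      simp
    rw [show s.length + (k+1) = (s.length + k) + 1 from by omega]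
    simp only [PySem.Chars.rfind.go]
    rw [if_neg, ih]
    rw [hdrop]
    intro hk
    have hp : ['.'] <+: List.drop k t := List.isPrefixOf_iff_prefix.mp hk
    exact ht (List.mem_of_mem_drop (hp.mem (by simp)))

theorem pv_rfind_last (s t : List Char) (ht : '.' ∉ t) :
    PySem.Chars.rfind (s ++ '.' :: t) ['.'] = s.length := by
  rw [PySem.Chars.rfind, show (s ++ '.' :: t).length = s.length + (t.length + 1) from by simp]
  exact pv_rfind_go_last s t ht _

theorem pv_intercalate_concat (c : Char) (as : List (List Char)) (b : List Char) (h : as ≠ []) :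
    [c].intercalate (as ++ [b]) = [c].intercalate as ++ c :: b := by
  induction as with
  | nil => simp at h
  | cons a as ih =>
    cases as with
    | nil => simp [List.intercalate]
    | cons a' as' =>
      have := ih (by simp)
      simp only [List.intercalate] at *
      simp only [List.cons_append, List.intersperse] at *
      simp_all

theorem pv_join_toList (ps : List String) :
    (PySem.Str.join "." ps).toList = ['.'].intercalate (ps.map String.toList) := by
  rw [PySem.Str.toList_join]; rfl

theorem pv_main (ps : List String) (hdot : ∀ p ∈ ps, '.' ∉ p.toList) (hne : ps ≠ []) :
    ∀ out0, chain_loop (PySem.Str.join "." ps) out0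
      = out0 ++ (PySem.List.pyRange (ps.length : Int) 0 (-1)).map
          (fun i => PySem.Str.join "." (PySem.List.slice ps none (some i))) := by
  induction ps using List.reverseRecOn with
  | nil => exact absurd rfl hne
  | append_singleton qs p ih =>
    intro out0
    rcases qs with _ | ⟨q0, qs'⟩
    · -- single part: no '.', the loop stops after one append
      simp only [List.nil_append] at hdot ⊢
      have hp : '.' ∉ p.toList := hdot p (by simp)
      have hj : PySem.Str.join "." [p] = p := by
        rw [← String.toList_inj, pv_join_toList]
        simp [List.intercalate]
      rw [hj, chain_loop]
      simp only [PySem.Str.rfind_eq]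
      rw [show ("." : String).toList = ['.'] from rfl, pv_rfind_no_dot p.toList hp]
      rw [show ((([p] : List String).length : Int)) = 1 from by simp]
      rw [PySem.List.pyRange_neg_one_cons (by omega)]
      rw [show (1 - 1 : Int) = 0 from by omega, PySem.List.pyRange_neg_one_eq_nil (by omega)]
      simp only [List.map_cons, List.map_nil]
      rw [PySem.List.slice_to _ (by omega)]
      simp [hj]
    · set qs := q0 :: qs' with hqs
      have hqsne : qs.map String.toList ≠ [] := by simp [hqs]
      set D := PySem.Str.join "." (qs ++ [p]) with hD
      set jq := PySem.Str.join "." qs with hjq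
      have hp : '.' ∉ p.toList := hdot p (by simp)
      have hd : D.toList = jq.toList ++ '.' :: p.toList := by
        rw [hD, hjq, pv_join_toList, pv_join_toList, List.map_append, List.map_singleton,
          pv_intercalate_concat _ _ _ hqsne]
      have hrf : PySem.Str.rfind D "." = (jq.toList.length : Int) := by
        rw [PySem.Str.rfind_eq, show ("." : String).toList = ['.'] from rfl, hd,
          pv_rfind_last _ _ hp]
      have hslice : PySem.Str.slice D none (some (PySem.Str.rfind D ".")) = jq := by
        rw [← String.toList_inj, PySem.Str.toList_slice, PySem.Chars.slice_eq_listSlice, hrf,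
          PySem.List.slice_to _ (by omega), hd]
        rw [Int.toNat_natCast, List.take_left]
      rw [chain_loop]
      simp only [hrf]
      rw [if_neg (show ¬((jq.toList.length : Int) = -1) by omega)]
      rw [show PySem.Str.slice D none (some ((jq.toList.length : Int))) = jq from by
        rw [← hrf, hslice]]
      rw [ih (fun r hr => hdot r (List.mem_append_left _ hr)) (by simp [hqs])]
      -- now massage the RHS
      rw [show (((qs ++ [p]).length : Int)) = (qs.length : Int) + 1 from by simp]
      rw [PySem.List.pyRange_neg_one_cons (a := (qs.length : Int) + 1) (b := 0) (by omega)]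
      rw [show ((qs.length : Int) + 1 - 1) = (qs.length : Int) from by omega]
      simp only [List.map_cons]
      rw [PySem.List.slice_to _ (by omega),
        show ((qs.length : Int) + 1).toNat = (qs ++ [p]).length from by simp,
        List.take_length]
      have hcg : List.map (fun i => PySem.Str.join "." (PySem.List.slice (qs ++ [p]) none (some i)))
            (PySem.List.pyRange (qs.length : Int) 0 (-1))
          = List.map (fun i => PySem.Str.join "." (PySem.List.slice qs none (some i)))
            (PySem.List.pyRange (qs.length : Int) 0 (-1)) :=
        List.map_congr_left (fun i hi => by
          have hmem := PySem.List.mem_pyRange_neg_one.mp hi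
          show PySem.Str.join "." (PySem.List.slice (qs ++ [p]) none (some i))
            = PySem.Str.join "." (PySem.List.slice qs none (some i))
          rw [PySem.List.slice_to _ (by omega), PySem.List.slice_to _ (by omega),
            List.take_append, show i.toNat - qs.length = 0 from by omega]
          simp)
      rw [hcg]
      simp [hD]

theorem pv_core (d : String) :
    (PySem.List.pyRange ((((PySem.Str.split? d ".").getD []).length : Int)) 0 (-1)).map
      (fun i => PySem.Str.join "." (PySem.List.slice ((PySem.Str.split? d ".").getD []) none (some i)))
      = chain_loop d [] := by
  obtain ⟨ps, hps, hmap⟩ : ∃ ps, PySem.Str.split? d "." = some ps ∧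
      ps.map String.toList = List.splitOn '.' d.toList := by
    have h := PySem.Str.split?_map d "."
    rw [show ("." : String).toList = ['.'] from rfl] at h
    rw [show PySem.Chars.split? d.toList ['.'] = some (PySem.Chars.splitOn d.toList ['.']) from by
      simp [PySem.Chars.split?]] at h
    rcases hx : PySem.Str.split? d "." with _ | ps
    · rw [hx] at h; simp at h
    · rw [hx] at h
      refine ⟨ps, rfl, ?_⟩
      simp only [Option.map_some] at h
      injection h with h
      rw [h, pv_splitOn_eq]
  have hne : ps ≠ [] := by
    intro h
    rw [h] at hmap
    exact List.splitOnP_ne_nil _ _ hmap.symm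
  have hdot : ∀ p ∈ ps, '.' ∉ p.toList := fun p hp =>
    pv_mem_splitOn d.toList p.toList (hmap ▸ List.mem_map_of_mem hp)
  have hjoin : PySem.Str.join "." ps = d := by
    rw [← String.toList_inj, pv_join_toList, hmap]
    exact List.intercalate_splitOn d.toList '.'
  rw [hps]
  simp only [Option.getD_some]
  rw [← hjoin, pv_main ps hdot hne []]
  simp

-- ===== VERDICT (by name: the statement is the Claim_ definition above) =====
theorem domain_chain_py_spec : Claim_equal_domain_chain_py := by
  intro domain _
  unfold Spec_domain_chain_py domain_chain_py domain_chain_py_alt normalize_domain_py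
  by_cases h0 : domain = ""
  · simp [h0]
  · simp only [beq_iff_eq, if_neg h0]
    by_cases hroot : (if PySem.Str.strip domain = "" then ROOT_DOMAIN
        else PySem.Str.strip domain) = ROOT_DOMAIN
    · simp only [if_pos hroot]
    · simp only [if_neg hroot]
      rw [pv_core]
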